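-- pv_equiv track=rewrite | github.com/souring001/turing-complete-compiler | asm_optimizer.py | push_pop_filter
-- ===== SOURCE A (Python) =====
-- def push_pop_filter(commands):
--     new_commands = []
--
--     i = 0
--     while i < len(commands):
--         command = commands[i]
--
--         if i == len(commands) - 1:
--             new_commands.append(command)
--             break
--
--         opecode = command[0]
--         if opecode == 'push':
--             next_opecode = commands[i+1][0]
--             if next_opecode == 'pop':
--                 new_commands.append(['addi', '0', command[1], commands[i+1][3]])
--                 i += 2
--                 continue
--
--         new_commands.append(command)
--         i += 1
--     return new_commands
-- ===== SOURCE B (Python) =====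
-- def push_pop_filter(commands):
--     new_commands = []
--     pending = None  # buffered 'push' waiting to see whether a 'pop' follows
--     for command in commands:
--         if pending is not None and command and command[0] == 'pop':
--             new_commands.append(['addi', '0', pending[1], command[3]])
--             pending = None
--         else:
--             if pending is not None:
--                 new_commands.append(pending)
--                 pending = None
--             if command and command[0] == 'push':
--                 pending = command
--             else:
--                 new_commands.append(command)
--     if pending is not None:
--         new_commands.append(pending)
--     return new_commands
-- ===== Notes on version B (the rewrite author's own statement) =====
-- stated objective: alternative
-- what changed: Replaces the index/look-ahead while loop (peek commands[i+1], skip two on merge) by a single look-behind pass that buffers one pending 'push' and either merges it with the next 'pop' or flushes it.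
import Mathlib
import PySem

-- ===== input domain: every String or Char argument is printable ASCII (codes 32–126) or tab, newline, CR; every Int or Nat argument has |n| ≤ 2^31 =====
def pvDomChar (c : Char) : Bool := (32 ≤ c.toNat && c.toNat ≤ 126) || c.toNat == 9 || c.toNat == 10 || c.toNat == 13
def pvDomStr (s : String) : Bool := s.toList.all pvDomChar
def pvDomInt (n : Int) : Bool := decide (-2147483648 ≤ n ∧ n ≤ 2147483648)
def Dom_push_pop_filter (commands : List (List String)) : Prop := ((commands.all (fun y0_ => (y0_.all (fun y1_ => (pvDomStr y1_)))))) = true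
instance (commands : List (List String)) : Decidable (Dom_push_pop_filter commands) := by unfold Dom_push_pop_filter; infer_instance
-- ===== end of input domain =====

-- B replaces A's index/look-ahead while loop by a single look-behind pass buffering one pending 'push' (alternative decomposition, same O(n) cost).


-- ===== PORT A =====
-- A's while loop over index i (i += 1, or i += 2 on a merge) becomes structural
-- recursion on the list: 'i == len-1' is the one-element case, 'commands[i+1]' is the
-- second pattern element. Indexing uses getD/headD defaults; Pre_ excludes the inputs
-- where the Python raises IndexError, and only there do the defaults fire.
def push_pop_filter (commands : List (List String)) : List (List String) :=
  match commands with
  | [] => []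
  | [c] => [c]
  | c :: d :: rest =>
    if c.headD "" = "push" then
      if d.headD "" = "pop" then
        ["addi", "0", c.getD 1 "", d.getD 3 ""] :: push_pop_filter rest
      else
        c :: push_pop_filter (d :: rest)
    else
      c :: push_pop_filter (d :: rest)

-- ===== PORT B =====
-- 'command and command[0] == <op>'
def pvIsOp (op : String) (c : List String) : Bool := !c.isEmpty && (c.headD "" == op)

-- the for-loop of Source B; the first argument is the 'pending' variable
def pvGo (pending : Option (List String)) (commands : List (List String)) : List (List String) :=
  match pending, commands with
  | none, [] => []
  | some p, [] => [p]                     -- trailing flush after the loop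
  | some p, c :: rest =>
    if pvIsOp "pop" c then
      ["addi", "0", p.getD 1 "", c.getD 3 ""] :: pvGo none rest
    else
      p :: (if pvIsOp "push" c then pvGo (some c) rest else c :: pvGo none rest)
  | none, c :: rest =>
    if pvIsOp "push" c then pvGo (some c) rest else c :: pvGo none rest

def push_pop_filter_alt (commands : List (List String)) : List (List String) :=
  pvGo none commands

-- ===== PRECONDITION & SPEC =====
-- Exactly the inputs on which Python A returns normally: every non-last command is
-- nonempty, a 'push' that is not last has a nonempty successor, and a 'push'
-- immediately followed by a 'pop' has len ≥ 2 resp. the 'pop' len ≥ 4 (otherwise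
-- commands[i][0] / command[1] / commands[i+1][3] raises IndexError).
def Pre_push_pop_filter (commands : List (List String)) : Prop :=
  ∀ i, i < commands.length - 1 →
    commands.getD i [] ≠ [] ∧
    ((commands.getD i []).headD "" = "push" →
      commands.getD (i+1) [] ≠ [] ∧
      ((commands.getD (i+1) []).headD "" = "pop" →
        2 ≤ (commands.getD i []).length ∧ 4 ≤ (commands.getD (i+1) []).length))
instance (commands : List (List String)) : Decidable (Pre_push_pop_filter commands) := by
  unfold Pre_push_pop_filter; infer_instance

def pvWitness_push_pop_filter : List (List String) :=
  [["push", "3"], ["pop", "r1", "r2", "r5"], ["addi", "1", "2", "3"]]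

def Spec_push_pop_filter (commands : List (List String)) (out : List (List String)) : Prop := out = push_pop_filter_alt commands
instance (commands : List (List String)) (out : List (List String)) : Decidable (Spec_push_pop_filter commands out) := by unfold Spec_push_pop_filter; infer_instance

-- ===== CLAIM (what is proved, stated in full; the proofs are below) =====
def Claim_equal_push_pop_filter : Prop := ∀ (commands : List (List String)), Dom_push_pop_filter commands → Pre_push_pop_filter commands → Spec_push_pop_filter commands (push_pop_filter commands)

-- ===== LEMMAS AND PROOFS =====

-- one step of the B pass with no pending push (definitional unfolding of pvGo)
theorem pvGo_none_cons (c : List String) (rest : List (List String)) :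
    pvGo none (c :: rest)
      = if pvIsOp "push" c then pvGo (some c) rest else c :: pvGo none rest := rfl

-- Flushing: if the next command is not a 'pop' (or there is none), a pending push is
-- emitted first and the pass continues with no pending state.
theorem pvGo_flush (c : List String) (l : List (List String))
    (h : pvIsOp "pop" (l.headD []) = false) : pvGo (some c) l = c :: pvGo none l := by
  cases l with
  | nil => simp [pvGo]
  | cons d rest =>
    simp only [List.headD_cons] at h
    simp [pvGo, h]

theorem pvGo_none_eq (commands : List (List String)) :
    pvGo none commands = push_pop_filter commands := by
  induction commands using push_pop_filter.induct with
  | case1 => rfl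
  | case2 c =>
    by_cases h : pvIsOp "push" c = true <;> simp [pvGo, push_pop_filter, h]
  | case3 c d rest hc hd ih =>
    obtain ⟨x, xs, rfl⟩ := List.exists_cons_of_ne_nil
      (show c ≠ [] by intro he; rw [he] at hc; exact absurd hc (by decide))
    obtain ⟨y, ys, rfl⟩ := List.exists_cons_of_ne_nil
      (show d ≠ [] by intro he; rw [he] at hd; exact absurd hd (by decide))
    simp only [List.headD_cons] at hc hd
    subst hc hd
    simp [pvGo, push_pop_filter, pvIsOp, ih]
  | case4 c d rest hc hd ih =>
    obtain ⟨x, xs, rfl⟩ := List.exists_cons_of_ne_nil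
      (show c ≠ [] by intro he; rw [he] at hc; exact absurd hc (by decide))
    simp only [List.headD_cons] at hc
    subst hc
    have hdp : pvIsOp "pop" d = false := by
      cases d with
      | nil => rfl
      | cons y ys => simp only [List.headD_cons] at hd; simp [pvIsOp, hd]
    rw [show pvGo none (("push" :: xs) :: d :: rest) = pvGo (some ("push" :: xs)) (d :: rest)
          from by simp [pvGo_none_cons, pvIsOp]]
    rw [pvGo_flush _ _ (by simpa using hdp), ih]
    cases d with
    | nil => simp [push_pop_filter]
    | cons y ys =>
      simp only [List.headD_cons] at hd
      simp [push_pop_filter, hd]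
  | case5 c d rest hc ih =>
    have hcp : pvIsOp "push" c = false := by
      cases c with
      | nil => rfl
      | cons y ys => simp only [List.headD_cons] at hc; simp [pvIsOp, hc]
    rw [pvGo_none_cons, if_neg (by simp [hcp]), ih]
    cases c with
    | nil => simp [push_pop_filter]
    | cons y ys =>
      simp only [List.headD_cons] at hc
      simp [push_pop_filter, hc]

-- ===== VERDICT (by name: the statement is the Claim_ definition above) =====
theorem push_pop_filter_spec : Claim_equal_push_pop_filter := by
  intro commands _ _
  unfold Spec_push_pop_filter push_pop_filter_alt
  exact (pvGo_none_eq commands).symm
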